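-- pv_equiv track=rewrite | github.com/BennyW23/level_design | lexicographical_find_optimal_graphs.py | find_durations
-- ===== SOURCE A (Python) =====
-- def find_durations(N, matrix):
--     """
--     Finds the duration set of the matrix by taking it's powers
--     The number of paths from source to target can be found in the top right entry of the matrix
--     """
--     paths = [0] * N
--     paths[0] = 1
--     durations = [set()] * N
--     durations[0] = {0}
--     for src in range(0, N - 1):
--         row = matrix[src]
--         for target in range(src + 1, N):
--             if row[target] == 1:
--                 paths[target] += paths[src]
--                 durations[target] = durations[target].union(set(map(lambda x: x + 1, durations[src])))
--     return (paths[-1], durations[-1])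
-- ===== SOURCE B (Python) =====
-- def find_durations(N, matrix):
--     """Top-down memoized recursion over precomputed predecessor lists (column access)
--     instead of the forward row-push dynamic programming of the original."""
--     preds = {j: [p for p in range(j) if matrix[p][j] == 1] for j in range(N)}
--     cache = {}
--
--     def solve(node):
--         if node in cache:
--             return cache[node]
--         if node == 0:
--             result = (1, {0})
--         else:
--             count = 0
--             lengths = set()
--             for p in preds[node]:
--                 c, ls = solve(p)
--                 count += c
--                 lengths |= {d + 1 for d in ls}
--             result = (count, lengths)
--         cache[node] = result
--         return result
--
--     return solve(N - 1)
-- ===== Notes on version B (the rewrite author's own statement) =====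
-- stated objective: alternative
-- what changed: Replaces A's forward row-push dynamic programming over two mutable arrays with a column-wise precomputation of predecessor lists plus a top-down memoized recursion solve(node) that pulls (path count, length set) from each predecessor, returning solve(N-1).
import Mathlib
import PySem

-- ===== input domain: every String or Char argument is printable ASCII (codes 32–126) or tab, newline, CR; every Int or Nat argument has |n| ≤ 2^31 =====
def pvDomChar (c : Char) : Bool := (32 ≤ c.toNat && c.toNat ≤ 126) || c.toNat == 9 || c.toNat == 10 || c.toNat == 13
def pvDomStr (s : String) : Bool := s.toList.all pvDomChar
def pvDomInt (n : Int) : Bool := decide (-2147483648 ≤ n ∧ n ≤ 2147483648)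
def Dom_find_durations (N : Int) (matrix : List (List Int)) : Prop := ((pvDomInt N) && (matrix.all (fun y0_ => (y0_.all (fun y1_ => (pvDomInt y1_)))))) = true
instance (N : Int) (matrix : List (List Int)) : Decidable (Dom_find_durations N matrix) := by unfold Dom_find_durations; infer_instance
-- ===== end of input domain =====

-- B replaces A's forward row-push DP with a top-down recursion over predecessor columns
-- (objective: alternative decomposition, same asymptotic cost; equal return value).

-- ===== PORT A =====
-- A-side helpers: the bodies of A's inner and outer loops, named so the proofs can refer to them
def pvInnerF (row : List Int) (src : Int)
    (st : List Int × List (PySem.Set Int)) (target : Int) : List Int × List (PySem.Set Int) :=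
  if PySem.List.pyGetD row target 0 == 1 then
    (PySem.List.pySetD st.1 target
        (PySem.List.pyGetD st.1 target 0 + PySem.List.pyGetD st.1 src 0),
     PySem.List.pySetD st.2 target
        (PySem.Set.union (PySem.List.pyGetD st.2 target PySem.Set.empty)
          (PySem.Set.ofList ((PySem.List.pyGetD st.2 src PySem.Set.empty).map (fun x => x + 1)))))
  else st

def pvOuterF (matrix : List (List Int)) (N : Int)
    (st : List Int × List (PySem.Set Int)) (src : Int) : List Int × List (PySem.Set Int) :=
  let row := PySem.List.pyGetD matrix src []
  (PySem.List.pyRange (src + 1) N 1).foldl (pvInnerF row src) st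

def find_durations (N : Int) (matrix : List (List Int)) : Int × List Int :=
  let paths : List Int := PySem.List.pySetD (List.replicate N.toNat 0) 0 1
  let durations : List (PySem.Set Int) :=
    PySem.List.pySetD (List.replicate N.toNat PySem.Set.empty) 0 (PySem.Set.ofList [0])
  let st := (PySem.List.pyRange 0 (N - 1) 1).foldl (pvOuterF matrix N) (paths, durations)
  (PySem.List.pyGetD st.1 (-1) 0, PySem.List.pyGetD st.2 (-1) PySem.Set.empty)

-- ===== PORT B =====
-- B's preds[j]: the predecessor list [p for p in range(j) if matrix[p][j] == 1] (column access).
-- The Python builds {j: this list for j in range(N)} once in a dict; the values are identical,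
-- and range(j) enumerates 0..j-1, carried here as Nat.
def find_durations_preds (matrix : List (List Int)) (j : Nat) : List Nat :=
  (List.range j).filter
    (fun p => PySem.List.pyGetD (PySem.List.pyGetD matrix (p : Int) []) (j : Int) 0 == 1)

-- B's solve(node): top-down recursion over preds[node]. The Python cache only avoids
-- recomputation and does not change any value, so the port is the plain recursion.
def find_durations_solve (matrix : List (List Int)) (node : Nat) : Int × PySem.Set Int :=
  if node = 0 then (1, PySem.Set.ofList [0])
  else
    (find_durations_preds matrix node).attach.foldl
      (fun acc p =>
        let r := find_durations_solve matrix p.1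
        (acc.1 + r.1, PySem.Set.union acc.2 (PySem.Set.ofList (r.2.map (fun d => d + 1)))))
      (0, PySem.Set.empty)
termination_by node
decreasing_by exact List.mem_range.mp (List.mem_filter.mp p.2).1

def find_durations_alt (N : Int) (matrix : List (List Int)) : Int × List Int :=
  -- solve(N - 1); outside Pre_ (N ≤ 0) the Python B raises KeyError at preds[N - 1],
  -- so the value returned by this total guard is never claimed about
  if N - 1 < 0 then (0, PySem.Set.empty)
  else find_durations_solve matrix (N - 1).toNat

-- ===== PRECONDITION & SPEC =====
-- Pre_ excludes exactly the inputs on which Python A raises IndexError: N ≤ 0 (paths[0] = 1),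
-- fewer than N-1 rows (matrix[src]), or one of the first N-1 rows shorter than N (row[target]).
def Pre_find_durations (N : Int) (matrix : List (List Int)) : Prop :=
  1 ≤ N ∧ N - 1 ≤ (matrix.length : Int) ∧
    ∀ row ∈ matrix.take (N - 1).toNat, N ≤ (row.length : Int)
instance (N : Int) (matrix : List (List Int)) : Decidable (Pre_find_durations N matrix) := by
  unfold Pre_find_durations; infer_instance

def pvWitness_find_durations : Int × List (List Int) := (2, [[0, 1], [0, 0]])

def Spec_find_durations (N : Int) (matrix : List (List Int)) (out : Int × List Int) : Prop := out = find_durations_alt N matrix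
instance (N : Int) (matrix : List (List Int)) (out : Int × List Int) : Decidable (Spec_find_durations N matrix out) := by unfold Spec_find_durations; infer_instance

-- ===== CLAIM (what is proved, stated in full; the proofs are below) =====
def Claim_equal_find_durations : Prop := ∀ (N : Int) (matrix : List (List Int)), Dom_find_durations N matrix → Pre_find_durations N matrix → Spec_find_durations N matrix (find_durations N matrix)

-- ===== LEMMAS AND PROOFS =====

-- the edge test both programs perform on the (p, t) entry of the matrix
def pvEdge (matrix : List (List Int)) (p t : Nat) : Bool :=
  PySem.List.pyGetD (PySem.List.pyGetD matrix (p : Int) []) (t : Int) 0 == 1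

-- B's fold over the first k predecessors of t, seeded with the source-node base case
def pvBig (matrix : List (List Int)) (t : Nat) (k : Nat) : Int × PySem.Set Int :=
  (List.range k).foldl
    (fun acc p =>
      if pvEdge matrix p t then
        (acc.1 + (find_durations_solve matrix p).1,
         PySem.Set.union acc.2
           (PySem.Set.ofList ((find_durations_solve matrix p).2.map (fun d => d + 1))))
      else acc)
    (if t = 0 then ((1 : Int), ([0] : PySem.Set Int)) else (0, PySem.Set.empty))

-- the value of A's arrays at index t after the outer loop has processed sources 0..s-1
def pvStA (matrix : List (List Int)) : Nat → Nat → Int × PySem.Set Int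
  | 0, t => if t = 0 then (1, [0]) else (0, PySem.Set.empty)
  | s+1, t =>
      if s < t ∧ pvEdge matrix s t then
        ((pvStA matrix s t).1 + (pvStA matrix s s).1,
         PySem.Set.union (pvStA matrix s t).2
           (PySem.Set.ofList ((pvStA matrix s s).2.map (fun x => x + 1))))
      else pvStA matrix s t

-- A's inner loop for source s, started at target bound a
def pvInnerRun (m : List (List Int)) (s : Nat) (N a : Int)
    (P : List Int) (D : List (PySem.Set Int)) : List Int × List (PySem.Set Int) :=
  (PySem.List.pyRange a N 1).foldl (pvInnerF (PySem.List.pyGetD m (s : Int) []) (s : Int)) (P, D)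

-- A's initial arrays
def pvInit (N : Int) : List Int × List (PySem.Set Int) :=
  (PySem.List.pySetD (List.replicate N.toNat 0) 0 1,
   PySem.List.pySetD (List.replicate N.toNat PySem.Set.empty) 0 (PySem.Set.ofList [0]))

lemma pv_getD_set {α : Type} [Inhabited α] (xs : List α) (j t : Nat) (v d : α) :
    (xs.set j v).getD t d = if t = j ∧ j < xs.length then v else xs.getD t d := by
  simp [List.getD_eq_getElem?_getD, List.getElem?_set]
  split_ifs <;> simp_all

lemma pv_getD_replicate {α : Type} [Inhabited α] (n t : Nat) (a : α) :
    (List.replicate n a).getD t a = a := by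
  by_cases h : t < n <;>
    simp [List.getD_eq_getElem?_getD, h]

lemma pv_pyGetD_neg_one {α : Type} (xs : List α) (d : α) (h : xs ≠ []) :
    PySem.List.pyGetD xs (-1) d = xs.getD (xs.length - 1) d := by
  have h1 : 1 ≤ xs.length := List.length_pos_iff.mpr h
  simp [PySem.List.pyGetD, PySem.List.pyIdx?, PySem.List.pyGet?, h1, List.getD_eq_getElem?_getD]

lemma pv_solve_eq_big (m : List (List Int)) (t : Nat) :
    find_durations_solve m t = pvBig m t t := by
  cases t with
  | zero =>
    rw [find_durations_solve]
    rfl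
  | succ n =>
    rw [find_durations_solve, if_neg (Nat.succ_ne_zero n)]
    refine Eq.trans (List.foldl_attach (f := fun (acc : Int × PySem.Set Int) (p : Nat) =>
      (acc.1 + (find_durations_solve m p).1,
       PySem.Set.union acc.2
         (PySem.Set.ofList ((find_durations_solve m p).2.map (fun d => d + 1)))))) ?_
    unfold find_durations_preds
    rw [List.foldl_filter]
    unfold pvBig pvEdge
    rw [if_neg (Nat.succ_ne_zero n)]

lemma pv_stA_eq (m : List (List Int)) (s t : Nat) :
    pvStA m s t = pvBig m t (min t s) := by
  induction s generalizing t with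
  | zero =>
    simp only [Nat.min_zero, pvStA, pvBig, List.range_zero, List.foldl_nil]
  | succ s ih =>
    by_cases hts : t ≤ s
    · have h1 : min t (s+1) = t := by omega
      have h2 : min t s = t := by omega
      rw [pvStA, if_neg (by omega), ih, h1, h2]
    · have h1 : min t (s+1) = s + 1 := by omega
      have h2 : min t s = s := by omega
      have hlt : s < t := by omega
      rw [h1]
      have hstep : pvBig m t (s+1) =
          (fun acc p =>
            if pvEdge m p t then
              (acc.1 + (find_durations_solve m p).1,
               PySem.Set.union acc.2
                 (PySem.Set.ofList ((find_durations_solve m p).2.map (fun d => d + 1))))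
            else acc) (pvBig m t s) s := by
        rw [pvBig, List.range_succ, List.foldl_append, List.foldl_cons, List.foldl_nil]
        rfl
      by_cases he : pvEdge m s t
      · rw [pvStA, if_pos ⟨hlt, he⟩, hstep]
        simp only [he, if_pos]
        rw [ih t, h2, ih s, Nat.min_self, ← pv_solve_eq_big]
      · rw [pvStA, if_neg (by simp [he]), hstep, ih t, h2]
        simp [he]

lemma pv_pyGetD_nonneg {α : Type} (xs : List α) (i : Int) (d : α) (h : 0 ≤ i) :
    PySem.List.pyGetD xs i d = xs.getD i.toNat d := by
  conv_lhs => rw [← Int.toNat_of_nonneg h]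
  rw [PySem.List.pyGetD_natCast]

lemma pv_inner_spec (m : List (List Int)) (s : Nat) (N : Int) :
    ∀ (k : Nat) (a : Int) (P : List Int) (D : List (PySem.Set Int)),
      (N - a).toNat ≤ k → (s : Int) < a → N ≤ (P.length : Int) → N ≤ (D.length : Int) →
      (pvInnerRun m s N a P D).1.length = P.length ∧
      (pvInnerRun m s N a P D).2.length = D.length ∧
      ∀ t : Nat, (t : Int) < N →
        (pvInnerRun m s N a P D).1.getD t 0 =
          (if a ≤ (t : Int) ∧ pvEdge m s t then P.getD t 0 + P.getD s 0 else P.getD t 0) ∧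
        (pvInnerRun m s N a P D).2.getD t PySem.Set.empty =
          (if a ≤ (t : Int) ∧ pvEdge m s t then
              PySem.Set.union (D.getD t PySem.Set.empty)
                (PySem.Set.ofList ((D.getD s PySem.Set.empty).map (fun x => x + 1)))
            else D.getD t PySem.Set.empty) := by
  intro k
  induction k with
  | zero =>
    intro a P D hk hs hP hD
    have hNa : N ≤ a := by omega
    unfold pvInnerRun
    rw [PySem.List.pyRange_one_eq_nil hNa, List.foldl_nil]
    refine ⟨rfl, rfl, ?_⟩
    intro t ht
    have hna : ¬ (a ≤ (t : Int) ∧ pvEdge m s t) := fun h => absurd h.1 (by omega)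
    rw [if_neg hna, if_neg hna]
    exact ⟨rfl, rfl⟩
  | succ k ih =>
    intro a P D hk hs hP hD
    by_cases hNa : N ≤ a
    · unfold pvInnerRun
      rw [PySem.List.pyRange_one_eq_nil hNa, List.foldl_nil]
      refine ⟨rfl, rfl, ?_⟩
      intro t ht
      have hna : ¬ (a ≤ (t : Int) ∧ pvEdge m s t) := fun h => absurd h.1 (by omega)
      rw [if_neg hna, if_neg hna]
      exact ⟨rfl, rfl⟩
    · have hlt : a < N := by omega
      have ha0 : (0 : Int) ≤ a := by omega
      have hcast : ((a.toNat : Nat) : Int) = a := Int.toNat_of_nonneg ha0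
      have haP : a.toNat < P.length := by omega
      have haD : a.toNat < D.length := by omega
      have hsa : s ≠ a.toNat := by omega
      have hrw : pvInnerRun m s N a P D =
          pvInnerRun m s N (a+1)
            (pvInnerF (PySem.List.pyGetD m (s : Int) []) (s : Int) (P, D) a).1
            (pvInnerF (PySem.List.pyGetD m (s : Int) []) (s : Int) (P, D) a).2 := by
        unfold pvInnerRun
        rw [PySem.List.pyRange_one_cons hlt, List.foldl_cons]
      have hedge_a : (PySem.List.pyGetD (PySem.List.pyGetD m (s : Int) []) a 0 == 1)
          = pvEdge m s a.toNat := by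
        unfold pvEdge
        rw [hcast]
      by_cases he : pvEdge m s a.toNat
      · -- the step writes index a = a.toNat
        have hstep : pvInnerF (PySem.List.pyGetD m (s : Int) []) (s : Int) (P, D) a =
            (P.set a.toNat (P.getD a.toNat 0 + P.getD s 0),
             D.set a.toNat (PySem.Set.union (D.getD a.toNat PySem.Set.empty)
               (PySem.Set.ofList ((D.getD s PySem.Set.empty).map (fun x => x + 1))))) := by
          unfold pvInnerF
          rw [hedge_a, if_pos he]
          rw [PySem.List.pySetD_of_nonneg _ _ ha0, PySem.List.pySetD_of_nonneg _ _ ha0,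
              pv_pyGetD_nonneg _ _ _ ha0, pv_pyGetD_nonneg _ _ _ ha0,
              PySem.List.pyGetD_natCast, PySem.List.pyGetD_natCast]
        rw [hrw, hstep]
        obtain ⟨L1, L2, H⟩ := ih (a+1)
          (P.set a.toNat (P.getD a.toNat 0 + P.getD s 0))
          (D.set a.toNat (PySem.Set.union (D.getD a.toNat PySem.Set.empty)
            (PySem.Set.ofList ((D.getD s PySem.Set.empty).map (fun x => x + 1)))))
          (by omega) (by omega) (by simp; omega) (by simp; omega)
        have eS : (P.set a.toNat (P.getD a.toNat 0 + P.getD s 0)).getD s 0 = P.getD s 0 := by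
          rw [pv_getD_set, if_neg (fun h => hsa h.1)]
        have eSD : (D.set a.toNat (PySem.Set.union (D.getD a.toNat PySem.Set.empty)
              (PySem.Set.ofList ((D.getD s PySem.Set.empty).map (fun x => x + 1))))).getD s
                PySem.Set.empty = D.getD s PySem.Set.empty := by
          rw [pv_getD_set, if_neg (fun h => hsa h.1)]
        refine ⟨by rw [L1]; simp, by rw [L2]; simp, ?_⟩
        intro t ht
        obtain ⟨H1, H2⟩ := H t ht
        by_cases hta : t = a.toNat
        · have c1 : ¬ (a + 1 ≤ (t : Int) ∧ pvEdge m s t) := fun h => by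
            have := h.1
            omega
          have he' : pvEdge m s t := by rw [hta]; exact he
          have c2 : a ≤ (t : Int) ∧ pvEdge m s t := ⟨by omega, he'⟩
          have eT1 : (P.set a.toNat (P.getD a.toNat 0 + P.getD s 0)).getD t 0
              = P.getD a.toNat 0 + P.getD s 0 := by
            rw [pv_getD_set, if_pos ⟨hta, haP⟩]
          have eT2 : (D.set a.toNat (PySem.Set.union (D.getD a.toNat PySem.Set.empty)
                (PySem.Set.ofList ((D.getD s PySem.Set.empty).map (fun x => x + 1))))).getD t
                  PySem.Set.empty
              = PySem.Set.union (D.getD a.toNat PySem.Set.empty)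
                  (PySem.Set.ofList ((D.getD s PySem.Set.empty).map (fun x => x + 1))) := by
            rw [pv_getD_set, if_pos ⟨hta, haD⟩]
          rw [H1, H2, if_neg c1, if_neg c1, eT1, eT2, if_pos c2, if_pos c2, hta]
          exact ⟨rfl, rfl⟩
        · have hc : (a + 1 ≤ (t : Int) ∧ pvEdge m s t) ↔ (a ≤ (t : Int) ∧ pvEdge m s t) := by
            constructor
            · rintro ⟨h1, h2⟩; exact ⟨by omega, h2⟩
            · rintro ⟨h1, h2⟩
              refine ⟨?_, h2⟩
              have hne : (t : Int) ≠ a := by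
                intro hh
                apply hta
                omega
              omega
          have eT1 : (P.set a.toNat (P.getD a.toNat 0 + P.getD s 0)).getD t 0
              = P.getD t 0 := by
            rw [pv_getD_set, if_neg (fun h => hta h.1)]
          have eT2 : (D.set a.toNat (PySem.Set.union (D.getD a.toNat PySem.Set.empty)
                (PySem.Set.ofList ((D.getD s PySem.Set.empty).map (fun x => x + 1))))).getD t
                  PySem.Set.empty
              = D.getD t PySem.Set.empty := by
            rw [pv_getD_set, if_neg (fun h => hta h.1)]
          rw [H1, H2, eT1, eT2, eS, eSD]
          by_cases hcond : a ≤ (t : Int) ∧ pvEdge m s t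
          · rw [if_pos (hc.mpr hcond), if_pos (hc.mpr hcond), if_pos hcond, if_pos hcond]
            exact ⟨rfl, rfl⟩
          · rw [if_neg (fun h => hcond (hc.mp h)), if_neg (fun h => hcond (hc.mp h)),
                if_neg hcond, if_neg hcond]
            exact ⟨rfl, rfl⟩
      · -- no write at target a
        have hstep : pvInnerF (PySem.List.pyGetD m (s : Int) []) (s : Int) (P, D) a = (P, D) := by
          unfold pvInnerF
          rw [hedge_a, if_neg he]
        rw [hrw, hstep]
        obtain ⟨L1, L2, H⟩ := ih (a+1) P D (by omega) (by omega) hP hD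
        refine ⟨L1, L2, ?_⟩
        intro t ht
        obtain ⟨H1, H2⟩ := H t ht
        by_cases hta : t = a.toNat
        · have c1 : ¬ (a + 1 ≤ (t : Int) ∧ pvEdge m s t) := fun h => by
            have := h.1
            omega
          have c2 : ¬ (a ≤ (t : Int) ∧ pvEdge m s t) := fun h => he (hta ▸ h.2)
          rw [H1, H2, if_neg c1, if_neg c1, if_neg c2, if_neg c2]
          exact ⟨rfl, rfl⟩
        · have hc : (a + 1 ≤ (t : Int) ∧ pvEdge m s t) ↔ (a ≤ (t : Int) ∧ pvEdge m s t) := by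
            constructor
            · rintro ⟨h1, h2⟩; exact ⟨by omega, h2⟩
            · rintro ⟨h1, h2⟩
              refine ⟨?_, h2⟩
              have hne : (t : Int) ≠ a := by
                intro hh
                apply hta
                omega
              omega
          rw [H1, H2]
          by_cases hcond : a ≤ (t : Int) ∧ pvEdge m s t
          · rw [if_pos (hc.mpr hcond), if_pos (hc.mpr hcond), if_pos hcond, if_pos hcond]
            exact ⟨rfl, rfl⟩
          · rw [if_neg (fun h => hcond (hc.mp h)), if_neg (fun h => hcond (hc.mp h)),
                if_neg hcond, if_neg hcond]
            exact ⟨rfl, rfl⟩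

lemma pv_outer_spec (m : List (List Int)) (N : Int) (hN : 1 ≤ N) :
    ∀ (s : Nat), (s : Int) ≤ N - 1 →
      ((PySem.List.pyRange 0 (s : Int) 1).foldl (pvOuterF m N) (pvInit N)).1.length = N.toNat ∧
      ((PySem.List.pyRange 0 (s : Int) 1).foldl (pvOuterF m N) (pvInit N)).2.length = N.toNat ∧
      ∀ t : Nat, (t : Int) < N →
        ((PySem.List.pyRange 0 (s : Int) 1).foldl (pvOuterF m N) (pvInit N)).1.getD t 0 = (pvStA m s t).1 ∧
        ((PySem.List.pyRange 0 (s : Int) 1).foldl (pvOuterF m N) (pvInit N)).2.getD t PySem.Set.empty = (pvStA m s t).2 := by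
  intro s
  induction s with
  | zero =>
    intro _
    rw [show ((0 : Nat) : Int) = 0 by rfl, PySem.List.pyRange_one_eq_nil le_rfl, List.foldl_nil]
    unfold pvInit
    rw [PySem.List.pySetD_of_nonneg _ _ le_rfl, PySem.List.pySetD_of_nonneg _ _ le_rfl]
    refine ⟨by simp, by simp, ?_⟩
    intro t ht
    have hn : (0 : Int).toNat < (List.replicate N.toNat (0 : Int)).length := by simp; omega
    have hn2 : (0 : Int).toNat < (List.replicate N.toNat (PySem.Set.empty : PySem.Set Int)).length := by
      simp; omega
    rw [pv_getD_set, pv_getD_set, pvStA]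
    by_cases ht0 : t = 0
    · have hz : t = (0 : Int).toNat := ht0
      have p1 : t = (0 : Int).toNat ∧
          (0 : Int).toNat < (List.replicate N.toNat (0 : Int)).length := ⟨hz, hn⟩
      have p2 : t = (0 : Int).toNat ∧
          (0 : Int).toNat < (List.replicate N.toNat (PySem.Set.empty : PySem.Set Int)).length :=
        ⟨hz, hn2⟩
      rw [if_pos p1, if_pos p2, if_pos ht0]
      exact ⟨rfl, rfl⟩
    · have q1 : ¬ (t = (0 : Int).toNat ∧
          (0 : Int).toNat < (List.replicate N.toNat (0 : Int)).length) := fun h => ht0 h.1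
      have q2 : ¬ (t = (0 : Int).toNat ∧
          (0 : Int).toNat < (List.replicate N.toNat (PySem.Set.empty : PySem.Set Int)).length) :=
        fun h => ht0 h.1
      rw [if_neg q1, if_neg q2, if_neg ht0]
      exact ⟨pv_getD_replicate N.toNat t 0, pv_getD_replicate N.toNat t PySem.Set.empty⟩
  | succ s ih =>
    intro hs
    have hs' : (s : Int) ≤ N - 1 := by push_cast at hs ⊢; omega
    obtain ⟨L1, L2, H⟩ := ih hs'
    have hsplit : ((((s + 1 : Nat)) : Int)) = (s : Int) + 1 := by push_cast; ring
    rw [hsplit, PySem.List.pyRange_one_succ_right (by positivity), List.foldl_append,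
        List.foldl_cons, List.foldl_nil]
    set res := (PySem.List.pyRange 0 (s : Int) 1).foldl (pvOuterF m N) (pvInit N) with hres
    have houter : pvOuterF m N res (s : Int) = pvInnerRun m s N ((s : Int) + 1) res.1 res.2 := by
      unfold pvOuterF pvInnerRun
      rfl
    rw [houter]
    obtain ⟨K1, K2, G⟩ := pv_inner_spec m s N (N - ((s : Int) + 1)).toNat ((s : Int) + 1) res.1 res.2
      le_rfl (by omega) (by rw [L1]; omega) (by rw [L2]; omega)
    refine ⟨by rw [K1, L1], by rw [K2, L2], ?_⟩
    intro t ht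
    obtain ⟨G1, G2⟩ := G t ht
    have hsN : ((s : Nat) : Int) < N := by omega
    obtain ⟨Ht1, Ht2⟩ := H t ht
    obtain ⟨Hs1, Hs2⟩ := H s hsN
    rw [G1, G2, Ht1, Ht2, Hs1, Hs2, pvStA]
    have hc : ((s : Int) + 1 ≤ (t : Int) ∧ pvEdge m s t) ↔ (s < t ∧ pvEdge m s t) := by
      constructor
      · rintro ⟨h1, h2⟩; exact ⟨by omega, h2⟩
      · rintro ⟨h1, h2⟩; exact ⟨by omega, h2⟩
    by_cases hcond : s < t ∧ pvEdge m s t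
    · rw [if_pos (hc.mpr hcond), if_pos (hc.mpr hcond), if_pos hcond]
      exact ⟨rfl, rfl⟩
    · rw [if_neg (fun h => hcond (hc.mp h)), if_neg (fun h => hcond (hc.mp h)), if_neg hcond]
      exact ⟨rfl, rfl⟩

-- ===== VERDICT (by name: the statement is the Claim_ definition above) =====
theorem find_durations_spec : Claim_equal_find_durations := by
  intro N matrix _ hpre
  obtain ⟨hN, -, -⟩ := hpre
  unfold Spec_find_durations find_durations find_durations_alt
  have hcast : (((N - 1).toNat : Nat) : Int) = N - 1 := Int.toNat_of_nonneg (by omega)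
  obtain ⟨L1, L2, H⟩ := pv_outer_spec matrix N hN (N - 1).toNat (by omega)
  rw [hcast] at L1 L2 H
  have hne1 : ((PySem.List.pyRange 0 (N - 1) 1).foldl (pvOuterF matrix N) (pvInit N)).1 ≠ [] := by
    intro hnil
    rw [hnil] at L1
    simp at L1
    omega
  have hne2 : ((PySem.List.pyRange 0 (N - 1) 1).foldl (pvOuterF matrix N) (pvInit N)).2 ≠ [] := by
    intro hnil
    rw [hnil] at L2
    simp at L2
    omega
  have ht : ((N.toNat - 1 : Nat) : Int) < N := by omega
  obtain ⟨H1, H2⟩ := H (N.toNat - 1) ht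
  have hsolve : pvStA matrix (N - 1).toNat (N.toNat - 1) =
      find_durations_solve matrix (N - 1).toNat := by
    have h' : (N - 1).toNat = N.toNat - 1 := by omega
    rw [h', pv_stA_eq, Nat.min_self, ← pv_solve_eq_big]
  rw [if_neg (by omega : ¬ N - 1 < 0)]
  show (PySem.List.pyGetD
          ((PySem.List.pyRange 0 (N - 1) 1).foldl (pvOuterF matrix N) (pvInit N)).1 (-1) 0,
        PySem.List.pyGetD
          ((PySem.List.pyRange 0 (N - 1) 1).foldl (pvOuterF matrix N) (pvInit N)).2 (-1)
          PySem.Set.empty)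
      = find_durations_solve matrix (N - 1).toNat
  rw [pv_pyGetD_neg_one _ _ hne1, pv_pyGetD_neg_one _ _ hne2, L1, L2, H1, H2, hsolve]
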